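-- pv_equiv track=rewrite | github.com/oscarvalenzuelab/DNSMeshProtocol | dmp/server/tsig_keystore.py | _label_glob
-- ===== SOURCE A (Python) =====
-- def _label_glob(pattern_label: str, owner_label: str) -> bool:
--     """Match one label with a single ``*`` wildcard at most. Order
--     keeps complexity O(label length); we don't support ``**`` or
--     multi-wildcard patterns yet — the DMP record names we need
--     (``slot-N``, ``mb-<hash>``, ``chunk-N-<hash>``) all have at
--     most one variable segment per label."""
--     if "*" not in pattern_label:
--         return pattern_label == owner_label
--     parts = pattern_label.split("*")
--     # Reconstruct: parts[0] + <wildcard> + parts[1] + <wildcard> + ...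
--     pos = 0
--     for i, part in enumerate(parts):
--         if i == 0:
--             if not owner_label.startswith(part):
--                 return False
--             pos = len(part)
--         elif i == len(parts) - 1:
--             if not owner_label.endswith(part):
--                 return False
--             if pos > len(owner_label) - len(part):
--                 return False
--         else:
--             idx = owner_label.find(part, pos)
--             if idx < 0:
--                 return False
--             pos = idx + len(part)
--     return True
-- ===== SOURCE B (Python) =====
-- def _label_glob(pattern_label: str, owner_label: str) -> bool:
--     """Backtracking wildcard match: walk the literal prefix iteratively; at the
--     first '*' try every number of absorbed characters and recurse on the rest.
--     Only '*' is a metacharacter (it matches any run of characters, possibly empty)."""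
--     p, o = pattern_label, owner_label
--     i = 0
--     while i < len(p) and p[i] != "*":
--         if i >= len(o) or p[i] != o[i]:
--             return False
--         i += 1
--     if i == len(p):
--         return len(o) == i
--     # p[i] == "*": let the wildcard absorb any number of characters and recurse
--     return any(_label_glob(p[i + 1:], o[k:]) for k in range(i, len(o) + 1))
-- ===== Notes on version B (the rewrite author's own statement) =====
-- stated objective: simpler
-- what changed: A splits the pattern on '*' and greedily scans the owner with startswith/endswith/find bookkeeping a running position; B is a plain backtracking matcher that walks the literal prefix and, at a '*', tries every number of absorbed characters and recurses on the remaining pattern.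
import Mathlib
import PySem

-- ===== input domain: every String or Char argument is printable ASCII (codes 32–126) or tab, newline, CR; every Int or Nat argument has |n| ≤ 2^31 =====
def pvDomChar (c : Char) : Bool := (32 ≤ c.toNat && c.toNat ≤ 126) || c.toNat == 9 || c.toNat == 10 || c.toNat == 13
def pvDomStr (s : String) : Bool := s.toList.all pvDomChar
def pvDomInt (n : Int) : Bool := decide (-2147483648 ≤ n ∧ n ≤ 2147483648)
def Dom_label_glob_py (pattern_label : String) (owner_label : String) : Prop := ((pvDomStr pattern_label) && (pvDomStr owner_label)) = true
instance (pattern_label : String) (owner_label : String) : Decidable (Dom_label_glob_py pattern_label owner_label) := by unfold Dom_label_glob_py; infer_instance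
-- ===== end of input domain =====

-- B replaces A's split-on-'*' + greedy startswith/endswith/find scan with a plain
-- backtracking matcher: walk the literal prefix, and at a '*' try every number of
-- absorbed characters and recurse (objective: simpler; same return value).


-- ===== PORT A =====
-- the `for i, part in enumerate(parts)` loop of A, with its three branches and early returns;
-- `n` is len(parts), `i` the enumerate counter, `pos` the running position (Python int)
def pvALoop (o : List Char) (n : Nat) : List (List Char) → Nat → Int → Bool
  | [], _, _ => true
  | part :: rest, i, pos =>
    if i = 0 then
      if PySem.Chars.startswith o part = false then false
      else pvALoop o n rest (i + 1) (part.length : Int)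
    else if i = n - 1 then
      if PySem.Chars.endswith o part = false then false
      else if pos > (o.length : Int) - (part.length : Int) then false
      else pvALoop o n rest (i + 1) pos
    else
      let idx := PySem.Chars.findFrom o part pos none
      if idx < 0 then false
      else pvALoop o n rest (i + 1) (idx + (part.length : Int))

def label_glob_py (pattern_label : String) (owner_label : String) : Bool :=
  let p := pattern_label.toList
  let o := owner_label.toList
  if PySem.Chars.isIn ['*'] p = false then p == o
  else
    let parts := PySem.Chars.splitOn p ['*']
    pvALoop o parts.length parts 0 0

-- ===== PORT B =====
-- B's recursion: the `while` literal walk is the structural descent on both lists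
-- (consuming one matched character per step); at a '*' (Source B's `any(... for k in
-- range(i, len(o) + 1))`) every number of absorbed characters is tried on the rest.
def pvBMatch : List Char → List Char → Bool
  | [], o => decide (o.length = 0)
  | a :: p, o =>
    if a = '*' then
      (List.range (o.length + 1)).any (fun k => pvBMatch p (o.drop k))
    else
      match o with
      | [] => false
      | b :: t => a == b && pvBMatch p t

def label_glob_py_alt (pattern_label : String) (owner_label : String) : Bool :=
  pvBMatch pattern_label.toList owner_label.toList

-- ===== PRECONDITION & SPEC =====
def Spec_label_glob_py (pattern_label : String) (owner_label : String) (out : Bool) : Prop := out = label_glob_py_alt pattern_label owner_label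
instance (pattern_label : String) (owner_label : String) (out : Bool) : Decidable (Spec_label_glob_py pattern_label owner_label out) := by unfold Spec_label_glob_py; infer_instance

-- ===== CLAIM (what is proved, stated in full; the proofs are below) =====
def Claim_equal_label_glob_py : Prop := ∀ (pattern_label : String) (owner_label : String), Dom_label_glob_py pattern_label owner_label → Spec_label_glob_py pattern_label owner_label (label_glob_py pattern_label owner_label)

-- ===== LEMMAS AND PROOFS =====

-- Reference semantics: single-metacharacter ('*') glob matching, by recursion on both lists.
def pvGlob : List Char → List Char → Bool
  | [], [] => true
  | [], _ :: _ => false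
  | a :: p, [] => (a == '*') && pvGlob p []
  | a :: p, b :: t =>
    if a = '*' then pvGlob p (b :: t) || pvGlob (a :: p) t
    else (a == b) && pvGlob p t
termination_by p s => (p.length, s.length)


-- ---- A-side, part 1: the split on '*' as a clean recursion ----
def pvSplitc : List Char → List (List Char)
  | [] => [[]]
  | c :: l =>
    if c = '*' then [] :: pvSplitc l
    else
      match pvSplitc l with
      | [] => [[c]]
      | q :: qs => (c :: q) :: qs
def pvConsHead (x : List Char) : List (List Char) → List (List Char)
  | [] => [x]
  | q :: qs => (x ++ q) :: qs
theorem pvSplitc_ne_nil (l : List Char) : pvSplitc l ≠ [] := by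
  cases l with
  | nil => simp [pvSplitc]
  | cons c l =>
    by_cases hc : c = '*' <;> simp [pvSplitc, hc]
    cases h : pvSplitc l <;> simp

theorem pvSplitOn_go_eq (fuel : Nat) : ∀ (l cur : List Char) (acc : List (List Char)),
    l.length < fuel →
    PySem.Chars.splitOn.go ['*'] fuel l cur acc = acc.reverse ++ pvConsHead cur.reverse (pvSplitc l) := by
  induction fuel with
  | zero => intro l cur acc h; omega
  | succ f ih =>
    intro l cur acc h
    cases l with
    | nil => simp [PySem.Chars.splitOn.go, pvSplitc, pvConsHead]
    | cons c rest =>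
      simp only [List.length_cons] at h
      by_cases hc : c = '*'
      · have hpref : List.isPrefixOf ['*'] (c :: rest) = true := by simp [List.isPrefixOf, hc]
        rw [PySem.Chars.splitOn.go]
        simp only [hpref, if_pos]
        have hrec := ih (List.drop ['*'].length (c :: rest)) [] (cur.reverse :: acc) (by simp; omega)
        rw [hrec]
        simp [pvSplitc, hc]
        cases hsp : pvSplitc rest with
        | nil => exact absurd hsp (pvSplitc_ne_nil rest)
        | cons q qs => simp [pvConsHead]
      · have hpref : List.isPrefixOf ['*'] (c :: rest) = false := by
          simp [List.isPrefixOf]; exact fun hh => hc hh.symm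
        rw [PySem.Chars.splitOn.go]
        simp only [hpref, Bool.false_eq_true, if_false]
        have hrec := ih rest (c :: cur) acc (by omega)
        rw [hrec]
        cases hsp : pvSplitc rest with
        | nil => exact absurd hsp (pvSplitc_ne_nil rest)
        | cons q qs => simp [pvSplitc, hc, hsp, pvConsHead]

theorem pvSplitOn_eq (l : List Char) : PySem.Chars.splitOn l ['*'] = pvSplitc l := by
  rw [PySem.Chars.splitOn, pvSplitOn_go_eq (l.length + 1) l [] [] (by omega)]
  cases hsp : pvSplitc l with
  | nil => exact absurd hsp (pvSplitc_ne_nil l)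
  | cons q qs => simp [pvConsHead]

theorem pvSplitc_star_free (l : List Char) : ∀ part ∈ pvSplitc l, '*' ∉ part := by
  induction l with
  | nil => simp [pvSplitc]
  | cons c rest ih =>
    by_cases hc : c = '*'
    · simp [pvSplitc, hc]; exact ih
    · simp only [pvSplitc, hc, ite_false]
      cases hsp : pvSplitc rest with
      | nil => exact absurd hsp (pvSplitc_ne_nil rest)
      | cons q qs =>
        intro part hp
        simp at hp
        rcases hp with h1 | h2
        · subst h1
          have hq := ih q (by rw [hsp]; simp)
          simp [hq]; exact fun hh => hc hh.symm
        · exact ih part (by rw [hsp]; simp [h2])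

def pvJoin : List (List Char) → List Char
  | [] => []
  | [q] => q
  | q :: qs => q ++ '*' :: pvJoin qs

theorem pvJoin_splitc (l : List Char) : pvJoin (pvSplitc l) = l := by
  induction l with
  | nil => simp [pvSplitc, pvJoin]
  | cons c rest ih =>
    by_cases hc : c = '*'
    · cases hsp : pvSplitc rest with
      | nil => exact absurd hsp (pvSplitc_ne_nil rest)
      | cons q qs =>
        rw [hsp] at ih
        simp [pvSplitc, hc, hsp, pvJoin, ih]
    · cases hsp : pvSplitc rest with
      | nil => exact absurd hsp (pvSplitc_ne_nil rest)
      | cons q qs =>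
        rw [hsp] at ih
        simp [pvSplitc, hc, hsp]
        cases qs with
        | nil => simp [pvJoin] at ih ⊢; exact ih
        | cons q2 qs2 => simp [pvJoin] at ih ⊢; exact ih

theorem pvSplitc_two_le (l : List Char) (h : '*' ∈ l) : 2 ≤ (pvSplitc l).length := by
  induction l with
  | nil => simp at h
  | cons c rest ih =>
    by_cases hc : c = '*'
    · have := (pvSplitc_ne_nil rest)
      simp [pvSplitc, hc]
      cases hsp : pvSplitc rest with
      | nil => exact absurd hsp this
      | cons q qs => simp
    · have hr : '*' ∈ rest := by
        rcases List.mem_cons.1 h with h1 | h2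
        · exact absurd h1.symm hc
        · exact h2
      have := ih hr
      simp only [pvSplitc, hc, ite_false]
      cases hsp : pvSplitc rest with
      | nil => exact absurd hsp (pvSplitc_ne_nil rest)
      | cons q qs => rw [hsp] at this; simpa using this

-- ---- A-side, part 2: pvGlob facts ----
theorem pvGlob_nostar (q : List Char) (hq : '*' ∉ q) : ∀ s, pvGlob q s = (q == s) := by
  induction q with
  | nil => intro s; cases s <;> simp [pvGlob]
  | cons a p ih =>
    intro s
    have ha : a ≠ '*' := fun h => hq (by simp [h])
    cases s with
    | nil => simp [pvGlob, ha]
    | cons b t =>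
      rw [pvGlob]
      simp only [ha, ite_false]
      rw [ih (fun h => hq (List.mem_cons_of_mem _ h)) t]
      simp [List.cons_beq_cons]

theorem pvGlob_prefix (q : List Char) (hq : '*' ∉ q) : ∀ (r s : List Char),
    pvGlob (q ++ r) s = (decide (q <+: s) && pvGlob r (s.drop q.length)) := by
  induction q with
  | nil => intro r s; simp
  | cons a p ih =>
    intro r s
    have ha : a ≠ '*' := fun h => hq (by simp [h])
    cases s with
    | nil =>
      rw [List.cons_append, pvGlob]
      simp [ha]
    | cons b t =>
      rw [List.cons_append, pvGlob]
      simp only [ha, ite_false]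
      rw [ih (fun h => hq (List.mem_cons_of_mem _ h)) r t]
      by_cases hab : a = b
      · simp [hab, List.cons_prefix_cons]
      · simp [hab, List.cons_prefix_cons]

theorem pvGlob_star_cons (r t : List Char) (b : Char) (h : pvGlob ('*' :: r) t = true) :
    pvGlob ('*' :: r) (b :: t) = true := by
  rw [pvGlob]; simp [h]

theorem pvGlob_star_drop (r : List Char) (k : Nat) : ∀ s, pvGlob ('*' :: r) (s.drop k) = true →
    pvGlob ('*' :: r) s = true := by
  induction k with
  | zero => intro s h; simpa using h
  | succ k ih =>
    intro s h
    cases s with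
    | nil => simpa using h
    | cons b t =>
      have := ih t (by simpa using h)
      exact pvGlob_star_cons r t b this

theorem pvGlob_star_iff (r : List Char) : ∀ s,
    (pvGlob ('*' :: r) s = true ↔ ∃ k, k ≤ s.length ∧ pvGlob r (s.drop k) = true) := by
  intro s
  induction s with
  | nil =>
    rw [pvGlob]
    constructor
    · intro h; exact ⟨0, by simpa using h⟩
    · rintro ⟨k, hk, h⟩; simpa using h
  | cons b t ih =>
    rw [pvGlob, if_pos rfl]
    simp only [Bool.or_eq_true]
    constructor
    · rintro (h | h)
      · exact ⟨0, by simp, by simpa using h⟩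
      · obtain ⟨k, hk, h2⟩ := ih.1 h
        exact ⟨k + 1, by simpa using hk, by simpa using h2⟩
    · rintro ⟨k, hk, h⟩
      cases k with
      | zero => exact Or.inl (by simpa using h)
      | succ k => exact Or.inr (ih.2 ⟨k, by simpa using hk, by simpa using h⟩)

theorem pvSuffix_drop (q o : List Char) (k : Nat) (hk : k ≤ o.length) :
    q <:+ o.drop k ↔ (q <:+ o ∧ k + q.length ≤ o.length) := by
  constructor
  · intro h
    refine ⟨h.trans (List.drop_suffix k o), ?_⟩
    have := h.length_le
    simp [List.length_drop] at this
    omega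
  · rintro ⟨⟨u, hu⟩, hlen⟩
    refine ⟨u.drop k, ?_⟩
    have hul : u.length = o.length - q.length := by
      have := congrArg List.length hu
      simp at this; omega
    rw [← hu, List.drop_append_of_le_length (by omega)]

-- ---- A-side, part 3: the enumerate loop equals pvGlob of the reconstructed pattern ----
theorem pvSuffix_iff_exists_drop (t s : List Char) :
    t <:+ s ↔ ∃ j, j ≤ s.length ∧ s.drop j = t := by
  constructor
  · intro h
    exact ⟨s.length - t.length, by omega, (List.suffix_iff_eq_drop.mp h).symm⟩
  · rintro ⟨j, hj, h⟩
    exact h ▸ List.drop_suffix j s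

theorem pvJoin_cons (q : List Char) (qs : List (List Char)) (h : qs ≠ []) :
    pvJoin (q :: qs) = q ++ '*' :: pvJoin qs := by
  cases qs with
  | nil => exact absurd rfl h
  | cons q2 qs2 => rfl

theorem pvMidLoop (o : List Char) (n : Nat) : ∀ (ps : List (List Char)), ps ≠ [] →
    (∀ part ∈ ps, '*' ∉ part) → ∀ (i k : Nat), 1 ≤ i → n = i + ps.length → k ≤ o.length →
    pvALoop o n ps i (k : Int) = pvGlob ('*' :: pvJoin ps) (o.drop k) := by
  intro ps
  induction ps with
  | nil => intro h; exact absurd rfl h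
  | cons q qs ih =>
    intro _ hsf i k hi hn hk
    have hi0 : ¬ i = 0 := by omega
    have hqfree : '*' ∉ q := hsf q (by simp)
    by_cases hqs : qs = []
    · -- last part
      subst hqs
      have hin : i = n - 1 := by simp at hn; omega
      rw [pvALoop, if_neg hi0, if_pos hin]
      rw [show pvJoin [q] = q from rfl]
      rw [Bool.eq_iff_iff]
      constructor
      · intro h
        by_cases he : PySem.Chars.endswith o q = false
        · rw [if_pos he] at h; exact absurd h (by simp)
        · rw [if_neg he] at h
          by_cases hb : ((k : Int) > (o.length : Int) - (q.length : Int))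
          · rw [if_pos hb] at h; exact absurd h (by simp)
          · have he' : q <:+ o := (PySem.Chars.endswith_iff o q).mp (by simpa using he)
            have hqlen : q.length ≤ o.length := he'.length_le
            have hb' : k + q.length ≤ o.length := by omega
            rw [pvGlob_star_iff]
            have hsuf : q <:+ o.drop k := (pvSuffix_drop q o k hk).mpr ⟨he', hb'⟩
            obtain ⟨j, hj, hdj⟩ := (pvSuffix_iff_exists_drop q (o.drop k)).mp hsuf
            refine ⟨j, hj, ?_⟩
            rw [pvGlob_nostar q hqfree, hdj]
            simp
      · intro h
        rw [pvGlob_star_iff] at h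
        obtain ⟨j, hj, hg⟩ := h
        rw [pvGlob_nostar q hqfree] at hg
        have hdj : (o.drop k).drop j = q := ((beq_iff_eq).mp hg).symm
        have hsuf : q <:+ o.drop k := hdj ▸ List.drop_suffix j (o.drop k)
        obtain ⟨he', hb'⟩ := (pvSuffix_drop q o k hk).mp hsuf
        have he : ¬ PySem.Chars.endswith o q = false := by
          simp only [Bool.not_eq_false]
          exact (PySem.Chars.endswith_iff o q).mpr he'
        rw [if_neg he, if_neg (by omega)]
        rw [pvALoop]
    · -- middle part
      have hqs1 : 1 ≤ qs.length := List.length_pos_of_ne_nil hqs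
      have hin : ¬ i = n - 1 := by simp at hn; omega
      rw [pvALoop, if_neg hi0, if_neg hin]
      rw [pvJoin_cons q qs hqs]
      have hff := PySem.Chars.findFrom_natCast o q k hk
      by_cases hf : PySem.Chars.find (o.drop k) q = -1
      · rw [if_pos (by simp only [hff, if_pos hf]; norm_num)]
        have hval : pvGlob ('*' :: (q ++ '*' :: pvJoin qs)) (o.drop k) = false := by
          rw [← Bool.not_eq_true, pvGlob_star_iff]
          rintro ⟨j, hj, hg⟩
          rw [pvGlob_prefix q hqfree] at hg
          simp only [Bool.and_eq_true, decide_eq_true_eq] at hg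
          have hocc : ∃ j, q <+: (o.drop k).drop j := ⟨j, hg.1⟩
          have := (PySem.Chars.isIn_iff_infix q (o.drop k)).mp
            ((PySem.Chars.exists_prefix_drop_iff_isIn q (o.drop k)).mp hocc)
          exact (PySem.Chars.find_eq_neg_one_iff (o.drop k) q).mp hf this
        rw [hval]
      · have hfpos : 0 ≤ PySem.Chars.find (o.drop k) q := by
          have := PySem.Chars.neg_one_le_find (o.drop k) q
          rcases lt_or_ge (PySem.Chars.find (o.drop k) q) 0 with hlt | hge
          · exact absurd (by omega : PySem.Chars.find (o.drop k) q = -1) hf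
          · exact hge
        set j0 : Nat := (PySem.Chars.find (o.drop k) q).toNat with hj0
        obtain ⟨hpref, hmin⟩ := PySem.Chars.find_spec hfpos
        have hj0le : j0 ≤ o.length - k := by
          have := PySem.Chars.find_le_length (o.drop k) q
          simp only [List.length_drop] at this
          omega
        have hqlen : k + j0 + q.length ≤ o.length := by
          have := hpref.length_le
          simp only [List.length_drop] at this
          omega
        have hfind : PySem.Chars.find (o.drop k) q = (j0 : Int) := by omega
        have hidx : PySem.Chars.findFrom o q (k : Int) none = ((k + j0 : Nat) : Int) := by
          rw [hff, if_neg hf, hfind]; push_cast; ring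
        simp only [hidx]
        rw [if_neg (by push_cast; omega)]
        have harg : ((k + j0 : Nat) : Int) + (q.length : Int) = ((k + j0 + q.length : Nat) : Int) := by
          push_cast; ring
        rw [harg]
        rw [ih hqs (fun part hp => hsf part (by simp [hp])) (i+1) (k + j0 + q.length)
            (by omega) (by simp at hn ⊢; omega) (by omega)]
        rw [Bool.eq_iff_iff]
        constructor
        · intro h
          rw [pvGlob_star_iff]
          refine ⟨j0, by simp only [List.length_drop]; omega, ?_⟩
          rw [pvGlob_prefix q hqfree]
          simp only [Bool.and_eq_true, decide_eq_true_eq]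
          refine ⟨hpref, ?_⟩
          rw [List.drop_drop, List.drop_drop, ← Nat.add_assoc]
          exact h
        · intro h
          rw [pvGlob_star_iff] at h
          obtain ⟨j, hj, hg⟩ := h
          rw [pvGlob_prefix q hqfree] at hg
          simp only [Bool.and_eq_true, decide_eq_true_eq] at hg
          obtain ⟨hpj, hgj⟩ := hg
          have hjge : j0 ≤ j := by
            by_contra hlt
            exact hmin j (by omega) hpj
          rw [List.drop_drop, List.drop_drop] at hgj
          apply pvGlob_star_drop _ (j - j0)
          rw [List.drop_drop]
          have heq : k + j0 + q.length + (j - j0) = k + (j + q.length) := by omega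
          rw [heq]
          exact hgj

-- ---- B-side: pvBMatch computes pvGlob ----
theorem pvBMatch_eq_glob (p : List Char) : ∀ o, pvBMatch p o = pvGlob p o := by
  induction p with
  | nil => intro o; cases o <;> simp [pvBMatch, pvGlob]
  | cons a p ih =>
    intro o
    by_cases ha : a = '*'
    · subst ha
      rw [show pvBMatch ('*' :: p) o = (List.range (o.length + 1)).any (fun k => pvBMatch p (o.drop k)) from by rw [pvBMatch.eq_def]; simp]
      rw [Bool.eq_iff_iff, List.any_eq_true, pvGlob_star_iff]
      constructor
      · rintro ⟨k, hk, h⟩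
        exact ⟨k, by have := List.mem_range.mp hk; omega, by rw [← ih]; exact h⟩
      · rintro ⟨k, hk, h⟩
        exact ⟨k, List.mem_range.mpr (by omega), by rw [ih]; exact h⟩
    · rw [pvBMatch.eq_def]
      cases o with
      | nil => simp [pvGlob, ha]
      | cons b t => simp only [if_neg ha]; rw [pvGlob, if_neg ha, ih]

theorem pvB_eq_glob (pat own : String) :
    label_glob_py_alt pat own = pvGlob pat.toList own.toList := by
  unfold label_glob_py_alt
  exact pvBMatch_eq_glob pat.toList own.toList

theorem pvA_eq_glob (pat own : String) :
    label_glob_py pat own = pvGlob pat.toList own.toList := by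
  unfold label_glob_py
  by_cases hstar : '*' ∈ pat.toList
  · have hin : PySem.Chars.isIn ['*'] pat.toList = true :=
      (PySem.Chars.isIn_iff_infix ['*'] pat.toList).mpr ((List.singleton_infix_iff '*' pat.toList).mpr hstar)
    rw [if_neg (by simp [hin])]
    rw [pvSplitOn_eq]
    cases hsp : pvSplitc pat.toList with
    | nil => exact absurd hsp (pvSplitc_ne_nil pat.toList)
    | cons p0 ps =>
      have htwo := pvSplitc_two_le pat.toList hstar
      rw [hsp] at htwo
      have hps : ps ≠ [] := by
        cases ps
        · simp at htwo
        · simp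
      have hsf := pvSplitc_star_free pat.toList
      rw [hsp] at hsf
      have hjoin : p0 ++ '*' :: pvJoin ps = pat.toList := by
        rw [← pvJoin_cons p0 ps hps, ← hsp, pvJoin_splitc]
      have hp0free : '*' ∉ p0 := hsf p0 (by simp)
      rw [pvALoop, if_pos rfl, ← hjoin,
        pvGlob_prefix p0 hp0free ('*' :: pvJoin ps) own.toList]
      by_cases hsw : PySem.Chars.startswith own.toList p0 = false
      · rw [if_pos hsw]
        have : ¬ p0 <+: own.toList := fun hc =>
          (by simpa [hsw] using (PySem.Chars.startswith_iff own.toList p0).mpr hc)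
        simp [this]
      · rw [if_neg hsw]
        have hpre : p0 <+: own.toList := (PySem.Chars.startswith_iff own.toList p0).mp
          (by simpa using hsw)
        have hlen : p0.length ≤ own.toList.length := hpre.length_le
        have hmid := pvMidLoop own.toList (p0 :: ps).length ps hps
          (fun part hp => hsf part (by simp [hp])) 1 p0.length (le_refl 1) (by simp [Nat.add_comm]) hlen
        rw [hmid]
        simp [hpre]
  · have hnin : PySem.Chars.isIn ['*'] pat.toList = false :=
      (PySem.Chars.isIn_eq_false_iff ['*'] pat.toList).mpr
        (fun hinf => hstar ((List.singleton_infix_iff '*' pat.toList).mp hinf))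
    rw [if_pos (by simp [hnin])]
    rw [pvGlob_nostar pat.toList hstar own.toList]

-- ===== VERDICT (by name: the statement is the Claim_ definition above) =====
theorem label_glob_py_spec : Claim_equal_label_glob_py := by
  intro pat own _
  show label_glob_py pat own = label_glob_py_alt pat own
  rw [pvA_eq_glob, pvB_eq_glob]
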